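-- pv_equiv track=rewrite | github.com/TheStek/Advent-of-Code-2022 | Day 8/main.py | check_array
-- ===== SOURCE A (Python) =====
-- def check_array(arr):
-- 	max_height = -1
-- 	res = []
-- 	for item in arr:
-- 		if item <= max_height:
-- 			res.append(0)
-- 		else:
-- 			res.append(1)
-- 			max_height = item
-- 	return res
-- ===== SOURCE B (Python) =====
-- def check_array(arr):
--     # two-phase: build a prefix-maximum table, then compare element-wise
--     m = -1
--     prefix = []
--     for x in arr:
--         prefix.append(m)
--         m = max(m, x)
--     return [1 if x > p else 0 for x, p in zip(arr, prefix)]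
-- ===== Notes on version B (the rewrite author's own statement) =====
-- stated objective: alternative
-- what changed: Replaces the single inline running-max loop with a two-phase structure: first build a prefix-maximum table (max of all earlier elements, seeded -1), then a separate comprehension zips each element with its prefix max and emits the 0/1 flag.
import Mathlib
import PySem

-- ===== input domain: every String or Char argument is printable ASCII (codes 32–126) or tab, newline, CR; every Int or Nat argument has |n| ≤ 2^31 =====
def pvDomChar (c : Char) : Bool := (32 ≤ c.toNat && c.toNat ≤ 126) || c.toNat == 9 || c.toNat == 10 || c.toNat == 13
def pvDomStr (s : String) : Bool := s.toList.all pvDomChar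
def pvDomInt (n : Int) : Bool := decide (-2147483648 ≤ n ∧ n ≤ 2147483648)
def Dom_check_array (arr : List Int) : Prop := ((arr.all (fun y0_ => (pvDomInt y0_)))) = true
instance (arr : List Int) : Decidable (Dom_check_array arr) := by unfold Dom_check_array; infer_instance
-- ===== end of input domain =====

-- B replaces A's inline running-max loop by a prefix-max table plus a separate compare pass (alternative decomposition, same cost).

-- ===== PORT A =====
-- state: (max_height, res); the loop appends 0 or 1 and updates max_height
def check_array (arr : List Int) : List Int :=
  (arr.foldl
    (fun (s : Int × List Int) item =>
      if item ≤ s.1 then (s.1, s.2 ++ [0]) else (item, s.2 ++ [1]))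
    (-1, [])).2

-- ===== PORT B =====
-- phase 1: build prefix-maximum table (state: (m, prefix)); phase 2: zip-compare
def check_array_alt (arr : List Int) : List Int :=
  let s := arr.foldl (fun (s : Int × List Int) x => (max s.1 x, s.2 ++ [s.1])) (-1, [])
  (arr.zip s.2).map (fun xp => if xp.1 > xp.2 then 1 else 0)

-- ===== PRECONDITION & SPEC =====
def Spec_check_array (arr : List Int) (out : List Int) : Prop := out = check_array_alt arr
instance (arr : List Int) (out : List Int) : Decidable (Spec_check_array arr out) := by unfold Spec_check_array; infer_instance

-- ===== CLAIM (what is proved, stated in full; the proofs are below) =====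
def Claim_equal_check_array : Prop := ∀ (arr : List Int), Dom_check_array arr → Spec_check_array arr (check_array arr)

-- ===== LEMMAS AND PROOFS =====

-- common reference: flags of xs with running max m
def pvGo (m : Int) : List Int → List Int
  | [] => []
  | x :: xs => if x ≤ m then 0 :: pvGo m xs else 1 :: pvGo x xs

-- prefix-max table of xs with seed m
def pvPre (m : Int) : List Int → List Int
  | [] => []
  | x :: xs => m :: pvPre (max m x) xs

theorem pvA_eq (xs : List Int) : ∀ (m : Int) (acc : List Int),
    (xs.foldl
      (fun (s : Int × List Int) item =>
        if item ≤ s.1 then (s.1, s.2 ++ [0]) else (item, s.2 ++ [1]))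
      (m, acc)).2 = acc ++ pvGo m xs := by
  induction xs with
  | nil => intro m acc; simp [pvGo]
  | cons x xs ih =>
    intro m acc
    by_cases h : x ≤ m <;> simp [pvGo, h, List.foldl_cons, ih]

theorem pvB_pre (xs : List Int) : ∀ (m : Int) (acc : List Int),
    (xs.foldl (fun (s : Int × List Int) x => (max s.1 x, s.2 ++ [s.1])) (m, acc)).2
      = acc ++ pvPre m xs := by
  induction xs with
  | nil => intro m acc; simp [pvPre]
  | cons x xs ih => intro m acc; simp [pvPre, List.foldl_cons, ih]

theorem pvZip_eq (xs : List Int) : ∀ (m : Int),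
    (xs.zip (pvPre m xs)).map (fun xp => if xp.1 > xp.2 then (1 : Int) else 0)
      = pvGo m xs := by
  induction xs with
  | nil => intro m; simp [pvPre, pvGo]
  | cons x xs ih =>
    intro m
    by_cases h : x ≤ m
    · have hm : max m x = m := max_eq_left h
      simp [pvPre, pvGo, h, ih, not_lt.mpr h]
    · have hx : m < x := lt_of_not_ge h
      have hm : max m x = x := max_eq_right (le_of_lt hx)
      simp [pvPre, pvGo, h, hm, ih, hx]

-- ===== VERDICT (by name: the statement is the Claim_ definition above) =====
theorem check_array_spec : Claim_equal_check_array := by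
  intro arr _
  show check_array arr = check_array_alt arr
  unfold check_array check_array_alt
  simp only [pvA_eq, pvB_pre, pvZip_eq, List.nil_append]
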